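-- pv_equiv track=rewrite | github.com/matthewdgreen/decipher | src/analysis/transform_search.py | _outside_in_order
-- ===== SOURCE A (Python) =====
-- def _outside_in_order(width: int) -> list[int]:
--     order: list[int] = []
--     left = 0
--     right = width - 1
--     while left <= right:
--         order.append(left)
--         if left != right:
--             order.append(right)
--         left += 1
--         right -= 1
--     return order
-- ===== SOURCE B (Python) =====
-- def _outside_in_order(width: int) -> list[int]:
--     return [i // 2 if i % 2 == 0 else width - 1 - i // 2 for i in range(width)]
-- ===== Notes on version B (the rewrite author's own statement) =====
-- stated objective: idiomatic
-- what changed: Replaces the two-pointer left/right sweep with a single comprehension computing each element directly from its index by a parity closed form (i//2 for even i, width-1-i//2 for odd i).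
import Mathlib
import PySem

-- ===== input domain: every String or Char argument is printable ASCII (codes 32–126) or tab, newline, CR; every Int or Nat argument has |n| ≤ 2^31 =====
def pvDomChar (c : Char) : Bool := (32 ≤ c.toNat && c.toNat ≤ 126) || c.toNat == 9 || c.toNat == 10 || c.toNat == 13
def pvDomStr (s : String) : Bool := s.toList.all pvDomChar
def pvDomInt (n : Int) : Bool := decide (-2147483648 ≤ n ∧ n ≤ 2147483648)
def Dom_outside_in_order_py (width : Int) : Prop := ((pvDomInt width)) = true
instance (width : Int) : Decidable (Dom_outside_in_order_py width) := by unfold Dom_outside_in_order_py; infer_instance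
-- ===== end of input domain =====

-- B replaces A's two-pointer sweep with a per-index parity closed form (idiomatic comprehension).

-- ===== PORT A =====
-- the while loop of A, as structural recursion on the shrinking window [left, right]
def pvLoopA (left right : Int) : List Int :=
  if _h : left ≤ right then
    (left :: (if left ≠ right then [right] else [])) ++ pvLoopA (left + 1) (right - 1)
  else []
termination_by (right + 1 - left).toNat
decreasing_by omega

def outside_in_order_py (width : Int) : List Int :=
  pvLoopA 0 (width - 1)

-- ===== PORT B =====
def outside_in_order_py_alt (width : Int) : List Int :=
  (PySem.List.pyRange 0 width 1).map (fun i =>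
    if PySem.Int.mod i 2 = 0 then PySem.Int.floordiv i 2 else width - 1 - PySem.Int.floordiv i 2)

-- ===== PRECONDITION & SPEC =====
def Spec_outside_in_order_py (width : Int) (out : List Int) : Prop := out = outside_in_order_py_alt width
instance (width : Int) (out : List Int) : Decidable (Spec_outside_in_order_py width out) := by unfold Spec_outside_in_order_py; infer_instance

-- ===== CLAIM (what is proved, stated in full; the proofs are below) =====
def Claim_equal_outside_in_order_py : Prop := ∀ (width : Int), Dom_outside_in_order_py width → Spec_outside_in_order_py width (outside_in_order_py width)

-- ===== LEMMAS AND PROOFS =====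

-- A's loop on window [l, r] yields the parity-interleaved enumeration of its n = r+1-l indices
theorem pvLoopA_eq (n : Nat) : ∀ (l r : Int), (r + 1 - l).toNat = n →
    pvLoopA l r = (List.range n).map (fun k => if k % 2 = 0 then l + (k / 2 : Nat) else r - (k / 2 : Nat)) := by
  induction n using Nat.strong_induction_on with
  | _ n ih =>
    intro l r hn
    match n, hn with
    | 0, hn =>
      rw [pvLoopA, dif_neg (show ¬ l ≤ r by omega)]
      simp
    | 1, hn =>
      have hlr : l = r := by omega
      rw [pvLoopA, dif_pos (show l ≤ r by omega), if_neg (show ¬ l ≠ r by omega),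
        pvLoopA, dif_neg (show ¬ l + 1 ≤ r - 1 by omega)]
      simp [hlr]
    | (m + 2), hn =>
      rw [pvLoopA, dif_pos (show l ≤ r by omega), if_pos (show l ≠ r by omega)]
      rw [ih m (by omega) (l + 1) (r - 1) (by omega)]
      have hr : List.range (m + 2) = 0 :: 1 :: (List.range m).map (· + 2) := by
        rw [List.range_succ_eq_map, List.range_succ_eq_map]
        simp only [List.map_cons, List.map_map]
        rfl
      rw [hr]
      simp only [List.map_cons, List.map_map]
      refine List.cons_eq_cons.2 ⟨by norm_num, List.cons_eq_cons.2 ⟨by norm_num, ?_⟩⟩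
      refine List.map_congr_left (fun k _ => ?_)
      simp only [Function.comp]
      have h2 : (k + 2) % 2 = k % 2 := by omega
      have h3 : (k + 2) / 2 = k / 2 + 1 := by omega
      rw [h2, h3]
      by_cases hk : k % 2 = 0 <;> simp [hk] <;> push_cast <;> ring

-- ===== VERDICT (by name: the statement is the Claim_ definition above) =====
theorem outside_in_order_py_spec : Claim_equal_outside_in_order_py := by
  intro width _
  unfold Spec_outside_in_order_py outside_in_order_py outside_in_order_py_alt
  rw [pvLoopA_eq width.toNat 0 (width - 1) (by omega), PySem.List.pyRange_one, List.map_map]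
  have hw : (width - 0).toNat = width.toNat := by omega
  rw [hw]
  refine List.map_congr_left (fun k hk => ?_)
  have hk' : k < width.toNat := List.mem_range.mp hk
  simp only [Function.comp, zero_add]
  rw [PySem.Int.mod_eq_emod_of_pos (by omega), PySem.Int.floordiv_eq_ediv_of_pos (by omega)]
  have h2 : (k : Int) % 2 = ((k % 2 : Nat) : Int) := by push_cast; ring
  have h3 : (k : Int) / 2 = ((k / 2 : Nat) : Int) := by push_cast; ring
  rw [h2, h3]
  by_cases hp : k % 2 = 0 <;> simp [hp] <;> omega
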